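-- pv_equiv track=rewrite | github.com/Arsen1302/Code-copy-detector | TestData/solutions/problem_1583_2.py | solution_1583_2
-- ===== SOURCE A (Python) =====
-- from typing import List
--
-- def solution_1583_2(nums: List[int]) -> int:
--     n=len(nums)
--
--     newNums=[]*n
--     while(n!=1):
--         n=n//2
--         newNums=[]*n
--         for i in range(n):
--             if i%2==0:
--                 newNums.append(min(nums[2 * i], nums[2 * i + 1]))
--             else:
--                 newNums.append(max(nums[2 * i], nums[2 * i + 1]))
--         nums=newNums
--     return nums[0]
-- ===== SOURCE B (Python) =====
-- from typing import List
--
-- def solution_1583_2(nums: List[int]) -> int: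
--     if len(nums) == 1:
--         return nums[0]
--     half = len(nums) // 2
--     newNums = [min(nums[2 * i], nums[2 * i + 1]) if i % 2 == 0
--                else max(nums[2 * i], nums[2 * i + 1])
--                for i in range(half)]
--     return solution_1583_2(newNums)
-- ===== Notes on version B (the rewrite author's own statement) =====
-- stated objective: simpler
-- what changed: Replaced the while-loop with explicit length bookkeeping and append-loops by direct recursion on the list with a single comprehension building each halved round.
import Mathlib
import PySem

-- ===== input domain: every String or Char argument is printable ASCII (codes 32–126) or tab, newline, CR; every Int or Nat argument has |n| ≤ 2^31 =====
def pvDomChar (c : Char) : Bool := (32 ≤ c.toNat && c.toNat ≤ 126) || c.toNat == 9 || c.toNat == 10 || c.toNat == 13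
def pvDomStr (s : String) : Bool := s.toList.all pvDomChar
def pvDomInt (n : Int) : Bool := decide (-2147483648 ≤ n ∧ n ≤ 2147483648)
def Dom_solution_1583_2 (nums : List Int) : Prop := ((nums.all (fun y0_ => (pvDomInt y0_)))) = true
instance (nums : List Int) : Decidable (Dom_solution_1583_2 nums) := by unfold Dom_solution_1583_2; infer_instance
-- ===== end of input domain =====

-- B replaces A's while-loop with explicit length bookkeeping by direct recursion on the
-- list, building each halved round with one comprehension (objective: simpler).

-- ===== PORT A =====
-- A's inner for-loop: appends min/max of the pair nums[2i],nums[2i+1] for i in range(m).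
-- Indices are always in range when m = len(nums)//2 and len(nums) ≥ 2, so getD is exact there.
def pvRowA (m : Nat) (nums : List Int) : List Int :=
  (List.range m).foldl
    (fun acc i =>
      acc ++ [if i % 2 = 0 then min (nums.getD (2 * i) 0) (nums.getD (2 * i + 1) 0)
              else max (nums.getD (2 * i) 0) (nums.getD (2 * i + 1) 0)]) []

-- A's while-loop over the state (n, nums); n = 0 (empty input) diverges in Python and is
-- excluded by Pre_, the branch value there is irrelevant.
def pvLoopA (n : Nat) (nums : List Int) : Int :=
  if n = 1 then nums.headD 0
  else if n = 0 then 0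
  else pvLoopA (n / 2) (pvRowA (n / 2) nums)
termination_by n
decreasing_by omega

def solution_1583_2 (nums : List Int) : Int := pvLoopA nums.length nums

-- ===== PORT B =====
def pvRowB (nums : List Int) : List Int :=
  (List.range (nums.length / 2)).map
    (fun i =>
      if i % 2 = 0 then min (nums.getD (2 * i) 0) (nums.getD (2 * i + 1) 0)
      else max (nums.getD (2 * i) 0) (nums.getD (2 * i + 1) 0))

def solution_1583_2_alt (nums : List Int) : Int :=
  if nums.length ≤ 1 then nums.headD 0
  else solution_1583_2_alt (pvRowB nums)
termination_by nums.length
decreasing_by simp [pvRowB]; omega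

-- ===== PRECONDITION & SPEC =====
-- Pre_ excludes only the empty list, on which Python A loops forever (and B raises RecursionError).
def Pre_solution_1583_2 (nums : List Int) : Prop := nums ≠ []
instance (nums : List Int) : Decidable (Pre_solution_1583_2 nums) := by unfold Pre_solution_1583_2; infer_instance
def pvWitness_solution_1583_2 : List Int := ([1, 3, 5, 2])

def Spec_solution_1583_2 (nums : List Int) (out : Int) : Prop := out = solution_1583_2_alt nums
instance (nums : List Int) (out : Int) : Decidable (Spec_solution_1583_2 nums out) := by unfold Spec_solution_1583_2; infer_instance

-- ===== CLAIM (what is proved, stated in full; the proofs are below) =====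
def Claim_equal_solution_1583_2 : Prop := ∀ (nums : List Int), Dom_solution_1583_2 nums → Pre_solution_1583_2 nums → Spec_solution_1583_2 nums (solution_1583_2 nums)

-- ===== LEMMAS AND PROOFS =====

-- folding appends of singletons = map
theorem pv_foldl_append_map {α β : Type} (f : α → β) :
    ∀ (l : List α) (acc : List β),
      l.foldl (fun a i => a ++ [f i]) acc = acc ++ l.map f := by
  intro l
  induction l with
  | nil => simp
  | cons x xs ih => intro acc; simp [List.foldl, ih]

theorem pvRowA_eq_rowB (nums : List Int) :
    pvRowA (nums.length / 2) nums = pvRowB nums := by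
  unfold pvRowA pvRowB
  rw [pv_foldl_append_map]
  simp

theorem pvRowB_length (nums : List Int) : (pvRowB nums).length = nums.length / 2 := by
  simp [pvRowB]

theorem pvLoop_eq_alt : ∀ (n : Nat) (nums : List Int), n = nums.length → n ≠ 0 →
    pvLoopA n nums = solution_1583_2_alt nums := by
  intro n
  induction n using Nat.strong_induction_on with
  | _ n ih =>
    intro nums hn h0
    rw [pvLoopA, solution_1583_2_alt]
    by_cases h1 : n = 1
    · have hle : nums.length ≤ 1 := by omega
      simp [h1, hle]
    · have h2 : 2 ≤ n := by omega
      rw [if_neg h1, if_neg h0, if_neg (by omega : ¬ nums.length ≤ 1)]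
      rw [hn, pvRowA_eq_rowB]
      exact ih (nums.length / 2) (by omega) _ (pvRowB_length nums).symm (by omega)

-- ===== VERDICT (by name: the statement is the Claim_ definition above) =====
theorem solution_1583_2_spec : Claim_equal_solution_1583_2 := by
  intro nums _ hpre
  unfold Spec_solution_1583_2 solution_1583_2
  exact pvLoop_eq_alt nums.length nums rfl (by simpa [List.length_eq_zero_iff] using hpre)
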